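-- pv_equiv track=rewrite | github.com/Melania227/4InLine | 4ENLINEA - Morales Melania.py | comlumna_marcada
-- ===== SOURCE A (Python) =====
-- def comlumna_marcada(matriz):
--     res = []
--     columna = []
--     for i in range(0, len(matriz[0])):
--         for j in range(0, len(matriz)):
--             columna = columna + [matriz[j][i]]
--         res += [comlumna_marcada_aux(columna)]
--         columna = []
--     return res
--
-- def comlumna_marcada_aux(col):
--     marcada = False
--     i = 0
--     x = 8
--
--     while marcada == False and i < len(col):
--         if col[i] == x:
--             marcada = True
--         i += 1
--     return marcada
-- ===== SOURCE B (Python) =====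
-- def comlumna_marcada(matriz):
--     res = [False] * len(matriz[0])
--     for j in range(len(matriz)):
--         for i in range(len(matriz[0])):
--             if matriz[j][i] == 8:
--                 res[i] = True
--     return res
-- ===== Notes on version B (the rewrite author's own statement) =====
-- stated objective: faster
-- what changed: Instead of building each column by repeated list concatenation and scanning it with a while-loop helper, B keeps a per-column flag array and makes one row-major pass setting res[i] = True whenever matriz[j][i] == 8.
import Mathlib
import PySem

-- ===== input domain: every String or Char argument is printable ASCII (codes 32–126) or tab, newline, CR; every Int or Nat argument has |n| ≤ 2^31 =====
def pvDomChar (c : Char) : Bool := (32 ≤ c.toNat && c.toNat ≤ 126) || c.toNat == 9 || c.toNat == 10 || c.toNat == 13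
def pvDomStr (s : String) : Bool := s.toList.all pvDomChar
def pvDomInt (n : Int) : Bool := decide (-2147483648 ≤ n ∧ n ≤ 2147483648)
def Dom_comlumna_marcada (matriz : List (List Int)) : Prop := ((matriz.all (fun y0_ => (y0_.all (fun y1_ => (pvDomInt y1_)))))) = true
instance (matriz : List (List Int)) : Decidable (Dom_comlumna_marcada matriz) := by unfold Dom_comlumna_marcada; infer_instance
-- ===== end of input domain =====

-- B replaces A's per-column list building (repeated concatenation) and while-loop scan by a
-- single row-major pass that sets a per-column flag array (objective: faster).

-- ===== PORT A =====
-- 'while marcada == False and i < len(col)' ported as structural recursion on the remaining indices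
def comlumna_marcada_auxLoop (col : List Int) (i : Nat) : Bool :=
  if h : i < col.length then
    (if col[i] == (8 : Int) then true else comlumna_marcada_auxLoop col (i + 1))
  else false
termination_by col.length - i

def comlumna_marcada_aux (col : List Int) : Bool :=
  comlumna_marcada_auxLoop col 0

def comlumna_marcada (matriz : List (List Int)) : List Bool :=
  (PySem.List.pyRange 0 ((PySem.List.pyGetD matriz 0 []).length : Int) 1).foldl
    (fun res i =>
      let columna :=
        (PySem.List.pyRange 0 (matriz.length : Int) 1).foldl
          (fun c j => c ++ [PySem.List.pyGetD (PySem.List.pyGetD matriz j []) i 0]) []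
      res ++ [comlumna_marcada_aux columna]) []

-- ===== PORT B =====
def comlumna_marcada_alt (matriz : List (List Int)) : List Bool :=
  (PySem.List.pyRange 0 (matriz.length : Int) 1).foldl
    (fun res j =>
      (PySem.List.pyRange 0 ((PySem.List.pyGetD matriz 0 []).length : Int) 1).foldl
        (fun r i =>
          if PySem.List.pyGetD (PySem.List.pyGetD matriz j []) i 0 == (8 : Int) then
            PySem.List.pySetD r i true
          else r)
        res)
    (List.replicate (PySem.List.pyGetD matriz 0 []).length false)

-- ===== PRECONDITION & SPEC =====
-- Pre_ excludes exactly the inputs where the Python raises IndexError: an empty matriz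
-- (matriz[0]) and matrices with a row shorter than the first row (matriz[j][i]).
def Pre_comlumna_marcada (matriz : List (List Int)) : Prop :=
  matriz ≠ [] ∧ ∀ row ∈ matriz, (matriz.headD []).length ≤ row.length
instance (matriz : List (List Int)) : Decidable (Pre_comlumna_marcada matriz) := by
  unfold Pre_comlumna_marcada; infer_instance

def pvWitness_comlumna_marcada : List (List Int) := [[1, 8], [0, 3]]

def Spec_comlumna_marcada (matriz : List (List Int)) (out : List Bool) : Prop := out = comlumna_marcada_alt matriz
instance (matriz : List (List Int)) (out : List Bool) : Decidable (Spec_comlumna_marcada matriz out) := by unfold Spec_comlumna_marcada; infer_instance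

-- ===== CLAIM (what is proved, stated in full; the proofs are below) =====
def Claim_equal_comlumna_marcada : Prop := ∀ (matriz : List (List Int)), Dom_comlumna_marcada matriz → Pre_comlumna_marcada matriz → Spec_comlumna_marcada matriz (comlumna_marcada matriz)

-- ===== LEMMAS AND PROOFS =====

-- B's inner-loop body, named for the proofs
def step8 (row : List Int) (r : List Bool) (i : Int) : List Bool :=
  if PySem.List.pyGetD row i 0 == (8 : Int) then PySem.List.pySetD r i true else r

theorem step8_def (row : List Int) :
    (fun (r : List Bool) (i : Int) =>
      if PySem.List.pyGetD row i 0 == (8 : Int) then PySem.List.pySetD r i true else r)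
      = step8 row := rfl

theorem foldl_len {α : Type} (f : List Bool → α → List Bool)
    (h : ∀ r x, (f r x).length = r.length) (l : List α) (res : List Bool) :
    (l.foldl f res).length = res.length := by
  induction l generalizing res with
  | nil => rfl
  | cons a l ih => simp [List.foldl_cons, ih, h]

theorem inner_len (row : List Int) (m : Nat) (res : List Bool) :
    ((PySem.List.pyRange 0 (m : Int) 1).foldl (step8 row) res).length = res.length := by
  apply foldl_len
  intro r i
  simp [step8]
  split <;> simp [PySem.List.length_pySetD]

theorem inner_getD (row : List Int) (m : Nat) (res : List Bool) (hm : m ≤ res.length) (k : Nat) :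
    ((PySem.List.pyRange 0 (m : Int) 1).foldl (step8 row) res).getD k false
      = (res.getD k false || (decide (k < m) && (PySem.List.pyGetD row (k : Int) 0 == (8 : Int)))) := by
  induction m with
  | zero => simp
  | succ m ih =>
    have h1 : ((m : Int) + 1) = ((m + 1 : Nat) : Int) := by push_cast; ring
    have h2 : PySem.List.pyRange 0 ((m + 1 : Nat) : Int) 1
        = PySem.List.pyRange 0 (m : Int) 1 ++ [(m : Int)] := by
      rw [← h1, PySem.List.pyRange_one_succ_right (by positivity)]
    rw [h2, List.foldl_append]
    have hlen : ((PySem.List.pyRange 0 (m : Int) 1).foldl (step8 row) res).length = res.length :=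
      inner_len row m res
    have ihm := ih (by omega)
    simp only [List.foldl_cons, List.foldl_nil, step8]
    split
    · next hp =>
      rw [PySem.List.pySetD_natCast]
      rw [List.getD_eq_getElem?_getD, List.getElem?_set]
      by_cases hk : m = k
      · subst hk
        have hml : m < (List.foldl (step8 row) res (PySem.List.pyRange 0 (m : Int) 1)).length := by
          rw [hlen]; omega
        simp [hml]
        right
        simpa [List.getD_eq_getElem?_getD] using hp
      · simp only [if_neg hk]
        rw [← List.getD_eq_getElem?_getD, ihm]
        have : decide (k < m + 1) = decide (k < m) := by
          rcases Nat.lt_or_ge k m with h | h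
          · simp [h, Nat.lt_succ_of_lt h]
          · have h1 : ¬ k < m := by omega
            have h2 : ¬ k < m + 1 := by omega
            simp [h1, h2]
        rw [this]
    · next hp =>
      rw [ihm]
      by_cases hk : k = m
      · subst hk
        simp at hp
        simp [hp]
      · have : decide (k < m + 1) = decide (k < m) := by
          rcases Nat.lt_or_ge k m with h | h
          · simp [h, Nat.lt_succ_of_lt h]
          · have h1 : ¬ k < m := by omega
            have h2 : ¬ k < m + 1 := by omega
            simp [h1, h2]
        rw [this]

theorem outer_getD (n : Nat) (ms : List (List Int)) (res : List Bool)
    (h : n ≤ res.length) (k : Nat) :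
    (ms.foldl (fun r row => (PySem.List.pyRange 0 (n : Int) 1).foldl (step8 row) r) res).getD k false
      = (res.getD k false
          || ms.any (fun row => decide (k < n) && (PySem.List.pyGetD row (k : Int) 0 == (8 : Int)))) := by
  induction ms generalizing res with
  | nil => simp
  | cons row ms ih =>
    simp only [List.foldl_cons, List.any_cons]
    rw [ih _ (by rw [inner_len]; exact h), inner_getD row n res h k, Bool.or_assoc]

theorem outer_len (n : Nat) (ms : List (List Int)) (res : List Bool) :
    (ms.foldl (fun r row => (PySem.List.pyRange 0 (n : Int) 1).foldl (step8 row) r) res).length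
      = res.length := by
  apply foldl_len
  intro r row
  exact inner_len row n r

theorem auxLoop_eq_any (col : List Int) (i : Nat) :
    comlumna_marcada_auxLoop col i = (col.drop i).any (· == (8 : Int)) := by
  rw [comlumna_marcada_auxLoop]
  by_cases h : i < col.length
  · rw [dif_pos h, List.drop_eq_getElem_cons h, List.any_cons]
    by_cases hc : col[i] == (8 : Int)
    · simp [hc]
    · simp only [hc, Bool.false_or]
      exact auxLoop_eq_any col (i + 1)
  · rw [dif_neg h, List.drop_eq_nil_of_le (by omega)]
    rfl
termination_by col.length - i

theorem aux_eq_any (col : List Int) :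
    comlumna_marcada_aux col = col.any (· == (8 : Int)) := by
  rw [comlumna_marcada_aux, auxLoop_eq_any, List.drop_zero]

theorem A_eq_map (matriz : List (List Int)) :
    comlumna_marcada matriz =
      (PySem.List.pyRange 0 ((PySem.List.pyGetD matriz 0 []).length : Int) 1).map
        (fun i => matriz.any (fun row => PySem.List.pyGetD row i 0 == (8 : Int))) := by
  rw [comlumna_marcada]
  rw [PySem.List.foldl_append_singleton_eq_map]
  apply List.map_congr_left
  intro i _
  rw [PySem.List.foldl_pyRange_zero_pyGetD' matriz ([] : List Int)
        (fun c row => c ++ [PySem.List.pyGetD row i 0]) []]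
  rw [PySem.List.foldl_append_singleton_eq_map, aux_eq_any]
  simp [List.any_map, Function.comp_def]

theorem B_eq_map (matriz : List (List Int)) :
    comlumna_marcada_alt matriz =
      (PySem.List.pyRange 0 ((PySem.List.pyGetD matriz 0 []).length : Int) 1).map
        (fun i => matriz.any (fun row => PySem.List.pyGetD row i 0 == (8 : Int))) := by
  rw [comlumna_marcada_alt]
  simp only [step8_def]
  rw [PySem.List.foldl_pyRange_zero_pyGetD' matriz ([] : List Int)
        (fun r row => (PySem.List.pyRange 0 ((PySem.List.pyGetD matriz 0 []).length : Int) 1).foldl (step8 row) r)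
        (List.replicate (PySem.List.pyGetD matriz 0 []).length false)]
  set n := (PySem.List.pyGetD matriz 0 []).length with hn
  have hlenL : (matriz.foldl
      (fun r row => (PySem.List.pyRange 0 (n : Int) 1).foldl (step8 row) r)
      (List.replicate n false)).length = n := by
    rw [outer_len]; exact List.length_replicate
  have hlenR : ((PySem.List.pyRange 0 (n : Int) 1).map
      (fun i => matriz.any (fun row => PySem.List.pyGetD row i 0 == (8 : Int)))).length = n := by
    simp [PySem.List.length_pyRange_one]
  apply List.ext_getElem (by rw [hlenL, hlenR])
  intro k hk1 hk2
  have hkn : k < n := by rwa [hlenL] at hk1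
  rw [← List.getD_eq_getElem _ false hk1]
  rw [outer_getD n matriz (List.replicate n false) (by simp) k]
  rw [List.getElem_map, PySem.List.getElem_pyRange_one]
  simp [hkn]

-- ===== VERDICT (by name: the statement is the Claim_ definition above) =====
theorem comlumna_marcada_spec : Claim_equal_comlumna_marcada := by
  intro matriz _ _
  unfold Spec_comlumna_marcada
  rw [A_eq_map, B_eq_map]
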